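-- pv_equiv track=rewrite | github.com/jialin2236/LeetCodePractice | TopTag_Apr22/670_max_swap.py | max_swap
-- ===== SOURCE A (Python) =====
-- def max_swap(num: int) -> int:
--     num = [int(x) for x in str(num)]
--     n = len(num)
--     max_i = n - 1
--     i, j = 0, 0
--     for idx in range(n-1, -1, -1):
--         if num[idx] > num[max_i]:
--             max_i = idx
--         elif num[idx] < num[max_i]:
--             i = idx
--             j = max_i
--     num[i], num[j] = num[j], num[i]
--     return int(''.join([str(x) for x in num]))
-- ===== SOURCE B (Python) =====
-- def max_swap(num: int) -> int:
--     digits = [int(x) for x in str(num)]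
--     last = {}
--     for idx, d in enumerate(digits):
--         last[d] = idx
--     for i, d in enumerate(digits):
--         for c in range(9, d, -1):
--             j = last.get(c, -1)
--             if j > i:
--                 digits[i], digits[j] = digits[j], digits[i]
--                 return int(''.join(str(x) for x in digits))
--     return int(''.join(str(x) for x in digits))
-- ===== Notes on version B (the rewrite author's own statement) =====
-- stated objective: alternative
-- what changed: Replaces A's right-to-left scan that threads a running suffix-maximum index through the whole list by a left-to-right scan over a precomputed last-occurrence index of each digit, trying candidate digits 9..d+1 and swapping with the recorded last position on the first hit.
import Mathlib
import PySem

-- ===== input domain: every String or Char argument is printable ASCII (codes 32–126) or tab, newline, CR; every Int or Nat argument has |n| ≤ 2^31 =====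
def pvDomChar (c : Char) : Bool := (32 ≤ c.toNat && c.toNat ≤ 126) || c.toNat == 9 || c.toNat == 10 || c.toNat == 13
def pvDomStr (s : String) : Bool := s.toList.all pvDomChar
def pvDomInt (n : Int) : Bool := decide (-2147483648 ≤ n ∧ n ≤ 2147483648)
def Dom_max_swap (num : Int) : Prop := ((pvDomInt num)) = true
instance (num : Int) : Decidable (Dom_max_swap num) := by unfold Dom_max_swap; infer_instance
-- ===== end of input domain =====

-- B (max_swap_alt) replaces A's right-to-left suffix-max scan by a last-occurrence digit
-- index and a left-to-right scan trying digits 9..d+1 (objective: alternative algorithm,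
-- same cost class); equivalence is proved for all num ≥ 0 (A raises ValueError on negatives).

-- shared helpers of both ports (both Pythons end with int(''.join(str(x) for x in digits))
-- and start with [int(x) for x in str(num)])
def pvJoinInt (ds : List Int) : Int :=
  (PySem.Int.ofStr? (PySem.Str.join "" (ds.map PySem.Int.toStr))).getD 0

-- [int(x) for x in str(num)]; 'int(x) = x.toNat - 48' is exact on digit chars, which is all
-- Pre_ admits (on '-' Python raises ValueError and the input is outside Pre_)
def pvDigits (num : Int) : List Int :=
  (PySem.Int.toChars num).map (fun c => ((c.toNat : Int) - 48))

-- ===== PORT A =====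
-- for idx in range(n-1, -1, -1): …   processed here as idx = k-1, k-2, …, 0;
-- all indices touched lie in range, so indices are Nat and getD is exact
def maxSwapLoopA (ds : List Int) : Nat → Nat × Nat × Nat → Nat × Nat × Nat
  | 0, st => st
  | k+1, (maxI, i, j) =>
    if ds.getD maxI 0 < ds.getD k 0 then maxSwapLoopA ds k (k, i, j)
    else if ds.getD k 0 < ds.getD maxI 0 then maxSwapLoopA ds k (maxI, k, maxI)
    else maxSwapLoopA ds k (maxI, i, j)

def max_swap (num : Int) : Int :=
  let ds := pvDigits num
  let n := ds.length
  match maxSwapLoopA ds n (n - 1, 0, 0) with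
  | (_, i, j) => pvJoinInt ((ds.set i (ds.getD j 0)).set j (ds.getD i 0))

-- ===== PORT B =====
-- last = {}; for idx, d in enumerate(digits): last[d] = idx
def maxSwapLastB (ds : List Int) : PySem.Dict Int Int :=
  (PySem.List.enumerate ds).foldl (fun d p => d.insert p.2 p.1) PySem.Dict.empty

-- for c in range(9, d, -1): j = last.get(c, -1); if j > i: return j
def maxSwapInnerB (last : PySem.Dict Int Int) (i : Int) : List Int → Option Int
  | [] => none
  | c :: cs =>
    if i < last.getD c (-1) then some (last.getD c (-1)) else maxSwapInnerB last i cs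

-- for i, d in enumerate(digits): …   returns the swap pair (i, j) of the early return, if any
def maxSwapOuterB (last : PySem.Dict Int Int) : List (Int × Int) → Option (Int × Int)
  | [] => none
  | (i, d) :: rest =>
    match maxSwapInnerB last i (PySem.List.pyRange 9 d (-1)) with
    | some j => some (i, j)
    | none => maxSwapOuterB last rest

def max_swap_alt (num : Int) : Int :=
  let ds := pvDigits num
  let last := maxSwapLastB ds
  match maxSwapOuterB last (PySem.List.enumerate ds) with
  | some (i, j) =>
      pvJoinInt ((ds.set i.toNat (ds.getD j.toNat 0)).set j.toNat (ds.getD i.toNat 0))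
  | none => pvJoinInt ds

-- ===== PRECONDITION & SPEC =====
-- Pre_ excludes exactly num < 0, where A raises ValueError (int('-') on the sign character)
def Pre_max_swap (num : Int) : Prop := 0 ≤ num
instance (num : Int) : Decidable (Pre_max_swap num) := by unfold Pre_max_swap; infer_instance
def pvWitness_max_swap : Int := 2736

def Spec_max_swap (num : Int) (out : Int) : Prop := out = max_swap_alt num
instance (num : Int) (out : Int) : Decidable (Spec_max_swap num out) := by unfold Spec_max_swap; infer_instance

-- ===== CLAIM (what is proved, stated in full; the proofs are below) =====
def Claim_equal_max_swap : Prop := ∀ (num : Int), Dom_max_swap num → Pre_max_swap num → Spec_max_swap num (max_swap num)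

-- ===== LEMMAS AND PROOFS =====

theorem digitChar_bound (n : Nat) (h : n < 10) : 48 ≤ (Nat.digitChar n).toNat ∧ (Nat.digitChar n).toNat ≤ 57 := by
  interval_cases n <;> decide

theorem toDigitsCore_digits : ∀ (f n : Nat) (l : List Char),
    (∀ c ∈ l, 48 ≤ c.toNat ∧ c.toNat ≤ 57) →
    ∀ c ∈ Nat.toDigitsCore 10 f n l, 48 ≤ c.toNat ∧ c.toNat ≤ 57 := by
  intro f
  induction f with
  | zero => intro n l hl; simpa [Nat.toDigitsCore] using hl
  | succ f ih =>
    intro n l hl c hc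
    simp only [Nat.toDigitsCore] at hc
    by_cases h0 : n / 10 = 0
    · rw [if_pos h0] at hc
      rcases List.mem_cons.mp hc with hc | hc
      · subst hc; exact digitChar_bound _ (Nat.mod_lt _ (by omega))
      · exact hl _ hc
    · rw [if_neg h0] at hc
      refine ih _ _ ?_ _ hc
      intro c' hc'
      rcases List.mem_cons.mp hc' with hc' | hc'
      · subst hc'; exact digitChar_bound _ (Nat.mod_lt _ (by omega))
      · exact hl _ hc'

theorem toDigitsCore_ne_nil : ∀ (f n : Nat) (l : List Char), (l ≠ [] ∨ f ≠ 0) →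
    Nat.toDigitsCore 10 f n l ≠ [] := by
  intro f
  induction f with
  | zero => intro n l h; simp only [Nat.toDigitsCore]; tauto
  | succ f ih =>
    intro n l h
    simp only [Nat.toDigitsCore]
    split
    · simp
    · exact ih _ _ (Or.inl (by simp))

theorem pvDigits_le (num : Int) (h : 0 ≤ num) : ∀ x ∈ pvDigits num, x ≤ 9 := by
  intro x hx
  simp only [pvDigits, List.mem_map] at hx
  obtain ⟨c, hc, rfl⟩ := hx
  have he : PySem.Int.toChars num = Nat.toDigitsCore 10 (num.toNat + 1) num.toNat [] := by
    simp [PySem.Int.toChars, not_lt.mpr h, Nat.toDigits]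
  rw [he] at hc
  have : 48 ≤ c.toNat ∧ c.toNat ≤ 57 :=
    toDigitsCore_digits _ _ _ (by simp) c hc
  omega

theorem pvDigits_ne_nil (num : Int) (h : 0 ≤ num) : pvDigits num ≠ [] := by
  simp only [pvDigits, ne_eq, List.map_eq_nil_iff]
  have : PySem.Int.toChars num = Nat.toDigitsCore 10 (num.toNat + 1) num.toNat [] := by
    simp [PySem.Int.toChars, not_lt.mpr h, Nat.toDigits]
  rw [this]
  exact toDigitsCore_ne_nil _ _ _ (Or.inr (by omega))

def pvBad (ds : List Int) (t : Nat) : Prop := ∃ u, t < u ∧ u < ds.length ∧ ds.getD t 0 < ds.getD u 0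

def pvMaxAt (ds : List Int) (k m : Nat) : Prop :=
  k ≤ m ∧ m < ds.length ∧ (∀ t, k ≤ t → t < ds.length → ds.getD t 0 ≤ ds.getD m 0) ∧
    (∀ t, m < t → t < ds.length → ds.getD t 0 < ds.getD m 0)

def pvIJ (ds : List Int) (k i j : Nat) : Prop :=
  ((∀ t, k ≤ t → t < ds.length → ¬ pvBad ds t) ∧ i = 0 ∧ j = 0) ∨
  (k ≤ i ∧ i < ds.length ∧ pvBad ds i ∧ (∀ s, k ≤ s → s < i → ¬ pvBad ds s) ∧ pvMaxAt ds (i+1) j)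

theorem pvMaxAt_unique {ds : List Int} {k m m' : Nat}
    (h : pvMaxAt ds k m) (h' : pvMaxAt ds k m') : m = m' := by
  obtain ⟨hk, hn, hle, hlt⟩ := h
  obtain ⟨hk', hn', hle', hlt'⟩ := h'
  rcases Nat.lt_trichotomy m m' with hmm | hmm | hmm
  · have h1 := hlt m' hmm hn'
    have h2 := hle' m hk hn
    omega
  · exact hmm
  · have h1 := hlt' m hmm hn
    have h2 := hle m' hk' hn'
    omega

theorem loopA_good (ds : List Int) :
    ∀ (k maxI i j : Nat), pvMaxAt ds k maxI → pvIJ ds k i j →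
      (match maxSwapLoopA ds k (maxI, i, j) with
       | (maxI', i', j') => pvMaxAt ds 0 maxI' ∧ pvIJ ds 0 i' j') := by
  intro k
  induction k with
  | zero => intro maxI i j hm hij; simpa [maxSwapLoopA] using ⟨hm, hij⟩
  | succ k ih =>
    intro maxI i j hm hij
    obtain ⟨hk1, hk2, hle, hlt⟩ := hm
    have hkn : k < ds.length := by omega
    simp only [maxSwapLoopA]
    split
    · -- ds[maxI] < ds[k] : new max at k, k not bad
      rename_i hgt
      have hnb : ¬ pvBad ds k := by
        rintro ⟨u, hu1, hu2, hu3⟩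
        have := hle u (by omega) hu2
        omega
      refine ih k i j ?_ ?_
      · exact ⟨le_rfl, hkn, fun t ht1 ht2 => by
          rcases Nat.eq_or_lt_of_le ht1 with rfl | ht1
          · exact le_rfl
          · exact le_of_lt (lt_of_le_of_lt (hle t ht1 ht2) hgt),
          fun t ht1 ht2 => lt_of_le_of_lt (hle t (by omega) ht2) hgt⟩
      · rcases hij with ⟨hall, rfl, rfl⟩ | ⟨h1, h2, h3, h4, h5⟩
        · exact Or.inl ⟨fun t ht1 ht2 => by
            rcases Nat.eq_or_lt_of_le ht1 with rfl | ht1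
            · exact hnb
            · exact hall t ht1 ht2, rfl, rfl⟩
        · refine Or.inr ⟨by omega, h2, h3, fun s hs1 hs2 => ?_, h5⟩
          rcases Nat.eq_or_lt_of_le hs1 with rfl | hs1
          · exact hnb
          · exact h4 s hs1 hs2
    · split
      · -- ds[k] < ds[maxI] : k bad, becomes the least bad
        rename_i hge hlt2
        have hbad : pvBad ds k := ⟨maxI, by omega, hk2, hlt2⟩
        refine ih maxI k maxI ?_ ?_
        · exact ⟨by omega, hk2, fun t ht1 ht2 => by
            rcases Nat.eq_or_lt_of_le ht1 with rfl | ht1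
            · exact le_of_lt hlt2
            · exact hle t ht1 ht2, hlt⟩
        · exact Or.inr ⟨le_rfl, hkn, hbad, fun s hs1 hs2 => by omega,
            ⟨hk1, hk2, hle, hlt⟩⟩
      · -- equal : nothing changes, k not bad
        rename_i hge hge2
        have heq : ds.getD k 0 = ds.getD maxI 0 := by omega
        have hnb : ¬ pvBad ds k := by
          rintro ⟨u, hu1, hu2, hu3⟩
          have := hle u (by omega) hu2
          omega
        refine ih maxI i j ?_ ?_
        · exact ⟨by omega, hk2, fun t ht1 ht2 => by
            rcases Nat.eq_or_lt_of_le ht1 with rfl | ht1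
            · omega
            · exact hle t ht1 ht2, hlt⟩
        · rcases hij with ⟨hall, rfl, rfl⟩ | ⟨h1, h2, h3, h4, h5⟩
          · exact Or.inl ⟨fun t ht1 ht2 => by
              rcases Nat.eq_or_lt_of_le ht1 with rfl | ht1
              · exact hnb
              · exact hall t ht1 ht2, rfl, rfl⟩
          · refine Or.inr ⟨by omega, h2, h3, fun s hs1 hs2 => ?_, h5⟩
            rcases Nat.eq_or_lt_of_le hs1 with rfl | hs1
            · exact hnb
            · exact h4 s hs1 hs2

theorem loopA_char (ds : List Int) (h : ds ≠ []) :
    (match maxSwapLoopA ds ds.length (ds.length - 1, 0, 0) with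
     | (maxI', i', j') => pvMaxAt ds 0 maxI' ∧ pvIJ ds 0 i' j') := by
  have hn : 1 ≤ ds.length := List.length_pos_of_ne_nil h
  obtain ⟨n, hn'⟩ : ∃ n, ds.length = n + 1 := ⟨ds.length - 1, by omega⟩
  rw [hn']
  have : maxSwapLoopA ds (n+1) (n + 1 - 1, 0, 0) = maxSwapLoopA ds n (n, 0, 0) := by
    simp [maxSwapLoopA]
  rw [this]
  refine loopA_good ds n n 0 0 ?_ ?_
  · refine ⟨le_rfl, by omega, fun t ht1 ht2 => ?_, fun t ht1 ht2 => by omega⟩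
    have : t = n := by omega
    subst this; exact le_rfl
  · exact Or.inl ⟨fun t ht1 ht2 => by rintro ⟨u, hu1, hu2, hu3⟩; omega, rfl, rfl⟩

theorem lastB_getD (ds : List Int) (c : Int) :
    ((maxSwapLastB ds).getD c (-1) = -1 ∧ ∀ t, t < ds.length → ds.getD t 0 ≠ c) ∨
    (∃ m : Nat, (maxSwapLastB ds).getD c (-1) = (m : Int) ∧ m < ds.length ∧
      ds.getD m 0 = c ∧ ∀ t, m < t → t < ds.length → ds.getD t 0 ≠ c) := by
  induction ds using List.reverseRecOn with
  | nil => exact Or.inl ⟨by simp [maxSwapLastB, PySem.List.enumerate], by simp⟩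
  | append_singleton xs x ih =>
    have hfold : maxSwapLastB (xs ++ [x]) = (maxSwapLastB xs).insert x (xs.length : Int) := by
      simp [maxSwapLastB, PySem.List.enumerate_append, PySem.List.enumerate]
    have hgetlen : (xs ++ [x]).getD xs.length 0 = x := by
      simp [List.getD]
    have hgetlt : ∀ t, t < xs.length → (xs ++ [x]).getD t 0 = xs.getD t 0 := by
      intro t ht
      simp [List.getD, List.getElem?_append_left ht]
    by_cases hc : c = x
    · subst hc
      refine Or.inr ⟨xs.length, ?_, by simp, hgetlen, fun t ht1 ht2 => by simp at ht2; omega⟩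
      rw [hfold, PySem.Dict.getD_insert]
      simp
    · have hgd : (maxSwapLastB (xs ++ [x])).getD c (-1) = (maxSwapLastB xs).getD c (-1) := by
        rw [hfold, PySem.Dict.getD_insert, if_neg hc]
      rcases ih with ⟨h1, h2⟩ | ⟨m, h1, h2, h3, h4⟩
      · refine Or.inl ⟨by rw [hgd]; exact h1, fun t ht => ?_⟩
        simp only [List.length_append, List.length_cons, List.length_nil] at ht
        rcases Nat.lt_or_ge t xs.length with h | h
        · rw [hgetlt t h]; exact h2 t h
        · have : t = xs.length := by omega
          subst this; rw [hgetlen]; exact fun hh => hc hh.symm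
      · refine Or.inr ⟨m, by rw [hgd]; exact h1, by simp; omega, by rw [hgetlt m h2]; exact h3,
          fun t ht1 ht2 => ?_⟩
        simp only [List.length_append, List.length_cons, List.length_nil] at ht2
        rcases Nat.lt_or_ge t xs.length with h | h
        · rw [hgetlt t h]; exact h4 t ht1 h
        · have : t = xs.length := by omega
          subst this; rw [hgetlen]; exact fun hh => hc hh.symm

theorem lastB_pred (ds : List Int) (k : Nat) (c : Int) :
    ((k : Int) < (maxSwapLastB ds).getD c (-1)) ↔
      ∃ u, k < u ∧ u < ds.length ∧ ds.getD u 0 = c := by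
  rcases lastB_getD ds c with ⟨h1, h2⟩ | ⟨m, h1, h2, h3, h4⟩
  · rw [h1]
    constructor
    · intro h; omega
    · rintro ⟨u, hu1, hu2, hu3⟩; exact absurd hu3 (h2 u hu2)
  · rw [h1]
    constructor
    · intro h
      exact ⟨m, by omega, h2, h3⟩
    · rintro ⟨u, hu1, hu2, hu3⟩
      by_contra hh
      have hum : u ≠ m := fun he => by omega
      exact h4 u (by omega) hu2 hu3

theorem innerB_char (ds : List Int) (k : Nat) (d : Int) :
    ∀ (a : Int),
      (match maxSwapInnerB (maxSwapLastB ds) (k : Int) (PySem.List.pyRange a d (-1)) with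
       | none => ∀ c : Int, d < c → c ≤ a → ∀ u, k < u → u < ds.length → ds.getD u 0 ≠ c
       | some j => ∃ (c : Int) (m : Nat), d < c ∧ c ≤ a ∧ j = (m : Int) ∧ k < m ∧ m < ds.length ∧
           ds.getD m 0 = c ∧ (∀ t, m < t → t < ds.length → ds.getD t 0 ≠ c) ∧
           (∀ c' : Int, c < c' → c' ≤ a → ∀ u, k < u → u < ds.length → ds.getD u 0 ≠ c')) := by
  intro a
  by_cases had : a ≤ d
  · rw [PySem.List.pyRange_neg_one_eq_nil had]
    intro c hc1 hc2; omega
  · push Not at had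
    obtain ⟨fuel, hfuel⟩ : ∃ f : Nat, (a - d).toNat = f := ⟨_, rfl⟩
    induction fuel generalizing a with
    | zero => omega
    | succ f ih =>
      rw [PySem.List.pyRange_neg_one_cons had]
      simp only [maxSwapInnerB]
      by_cases hpred : ((k : Int) < (maxSwapLastB ds).getD a (-1))
      · rw [if_pos hpred]
        obtain ⟨u, hu1, hu2, hu3⟩ := (lastB_pred ds k a).mp hpred
        rcases lastB_getD ds a with ⟨h1, _⟩ | ⟨m, h1, h2, h3, h4⟩
        · rw [h1] at hpred; omega
        · exact ⟨a, m, had, le_rfl, h1, by rw [h1] at hpred; omega, h2, h3, h4,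
            fun c' hc1 hc2 => by omega⟩
      · rw [if_neg hpred]
        have hnpa : ∀ u, k < u → u < ds.length → ds.getD u 0 ≠ a := by
          intro u hu1 hu2 he
          exact hpred ((lastB_pred ds k a).mpr ⟨u, hu1, hu2, he⟩)
        by_cases had' : d < a - 1
        · have hih := ih (a - 1) had' (by omega)
          rcases heq : maxSwapInnerB (maxSwapLastB ds) (k : Int) (PySem.List.pyRange (a-1) d (-1)) with _ | j <;>
            rw [heq] at hih <;> simp only []
          · intro c hc1 hc2 u hu1 hu2
            rcases eq_or_lt_of_le hc2 with rfl | hlt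
            · exact hnpa u hu1 hu2
            · exact hih c hc1 (by omega) u hu1 hu2
          · obtain ⟨c, m, h1, h2, h3, h4, h5, h6, h7, h8⟩ := hih
            exact ⟨c, m, h1, by omega, h3, h4, h5, h6, h7, fun c' hc1 hc2 u hu1 hu2 => by
              rcases eq_or_lt_of_le hc2 with rfl | hlt
              · exact hnpa u hu1 hu2
              · exact h8 c' hc1 (by omega) u hu1 hu2⟩
        · rw [PySem.List.pyRange_neg_one_eq_nil (by omega)]
          simp only [maxSwapInnerB]
          intro c hc1 hc2 u hu1 hu2
          have : c = a := by omega
          subst this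
          exact hnpa u hu1 hu2

theorem pvGetD_le9 (ds : List Int) (hb : ∀ x ∈ ds, x ≤ 9) (u : Nat) (hu : u < ds.length) :
    ds.getD u 0 ≤ 9 := by
  have h : ds.getD u 0 = ds[u] := by simp [List.getD, List.getElem?_eq_getElem hu]
  rw [h]; exact hb _ (List.getElem_mem _)

theorem outerB_char (ds : List Int) (hb : ∀ x ∈ ds, x ≤ 9) :
    ∀ (fuel k : Nat), ds.length - k = fuel →
      (match maxSwapOuterB (maxSwapLastB ds) (PySem.List.enumerate (ds.drop k) (k : Int)) with
       | none => ∀ t, k ≤ t → t < ds.length → ¬ pvBad ds t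
       | some (i, j) => ∃ (t m : Nat), i = (t : Int) ∧ j = (m : Int) ∧ k ≤ t ∧ t < ds.length ∧
           pvBad ds t ∧ (∀ s, k ≤ s → s < t → ¬ pvBad ds s) ∧ pvMaxAt ds (t+1) m) := by
  intro fuel
  induction fuel with
  | zero =>
    intro k hk
    have : ds.drop k = [] := List.drop_eq_nil_of_le (by omega)
    rw [this]
    simp only [PySem.List.enumerate, maxSwapOuterB]
    intro t ht1 ht2; omega
  | succ f ih =>
    intro k hk
    have hkn : k < ds.length := by omega
    have hdrop : ds.drop k = ds[k] :: ds.drop (k+1) := List.drop_eq_getElem_cons hkn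
    rw [hdrop, PySem.List.enumerate_cons]
    simp only [maxSwapOuterB]
    have hget : ds.getD k 0 = ds[k] := by simp [List.getD, List.getElem?_eq_getElem hkn]
    have hinner := innerB_char ds k (ds[k]) 9
    rcases heq : maxSwapInnerB (maxSwapLastB ds) (k : Int) (PySem.List.pyRange 9 (ds[k]) (-1)) with _ | j <;>
      rw [heq] at hinner
    · -- inner found nothing: k is not bad
      have hnb : ¬ pvBad ds k := by
        rintro ⟨u, hu1, hu2, hu3⟩
        have hub : ds.getD u 0 ≤ 9 := pvGetD_le9 ds hb u hu2
        exact hinner (ds.getD u 0) (by omega) (by omega) u hu1 hu2 rfl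
      have hih := ih (k+1) (by omega)
      have : ((k : Int) + 1) = ((k+1 : Nat) : Int) := by omega
      rw [this]
      rcases heq2 : maxSwapOuterB (maxSwapLastB ds) (PySem.List.enumerate (ds.drop (k+1)) ((k+1 : Nat) : Int)) with _ | ⟨bi, bj⟩ <;>
        rw [heq2] at hih <;> simp only []
      · intro t ht1 ht2
        rcases Nat.eq_or_lt_of_le ht1 with rfl | ht1
        · exact hnb
        · exact hih t ht1 ht2
      · obtain ⟨t, m, h1, h2, h3, h4, h5, h6, h7⟩ := hih
        refine ⟨t, m, h1, h2, by omega, h4, h5, fun s hs1 hs2 => ?_, h7⟩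
        rcases Nat.eq_or_lt_of_le hs1 with rfl | hs1
        · exact hnb
        · exact h6 s hs1 hs2
    · -- inner found c: k is the least bad index, j is the rightmost argmax of ds[k+1:]
      obtain ⟨c, m, h1, h2, h3, h4, h5, h6, h7, h8⟩ := hinner
      refine ⟨k, m, rfl, h3, le_rfl, hkn, ⟨m, h4, h5, by rw [hget]; omega⟩,
        fun s hs1 hs2 => by omega, by omega, h5, fun t ht1 ht2 => ?_, fun t ht1 ht2 => ?_⟩
      · -- ∀ t ∈ [k+1, n), ds[t] ≤ ds[m] = c
        rw [h6]
        by_contra hgt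
        push Not at hgt
        have hle9 : ds.getD t 0 ≤ 9 := pvGetD_le9 ds hb t ht2
        exact h8 (ds.getD t 0) hgt hle9 t (by omega) ht2 rfl
      · -- ∀ t > m, ds[t] < c
        rw [h6]
        have hne := h7 t ht1 ht2
        have hle : ds.getD t 0 ≤ c := by
          by_contra hgt
          push Not at hgt
          have hle9 : ds.getD t 0 ≤ 9 := pvGetD_le9 ds hb t ht2
          exact h8 (ds.getD t 0) hgt hle9 t (by omega) ht2 rfl
        omega

theorem core_eq (ds : List Int) (hne : ds ≠ []) (hb : ∀ x ∈ ds, x ≤ 9) :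
    (match maxSwapLoopA ds ds.length (ds.length - 1, 0, 0) with
     | (_, i, j) => (ds.set i (ds.getD j 0)).set j (ds.getD i 0))
    = (match maxSwapOuterB (maxSwapLastB ds) (PySem.List.enumerate ds) with
       | some (i, j) => (ds.set i.toNat (ds.getD j.toNat 0)).set j.toNat (ds.getD i.toNat 0)
       | none => ds) := by
  have hA := loopA_char ds hne
  have hB := outerB_char ds hb ds.length 0 (by omega)
  have henum : PySem.List.enumerate (ds.drop 0) ((0 : Nat) : Int) = PySem.List.enumerate ds := by
    simp
  rw [henum] at hB
  rcases hLA : maxSwapLoopA ds ds.length (ds.length - 1, 0, 0) with ⟨mI, i, j⟩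
  rw [hLA] at hA
  obtain ⟨hmax, hij⟩ := hA
  rcases hOB : maxSwapOuterB (maxSwapLastB ds) (PySem.List.enumerate ds) with _ | ⟨bi, bj⟩ <;>
    rw [hOB] at hB <;> simp only []
  · -- B found nothing: no bad index, A's (i, j) = (0, 0), the swap is a no-op
    rcases hij with ⟨_, rfl, rfl⟩ | ⟨_, _, hbad, _, _⟩
    · rw [List.set_set]
      have h0 : ds.getD 0 0 = ds[0]'(List.length_pos_of_ne_nil hne) := by
        simp [List.getD, List.getElem?_eq_getElem (List.length_pos_of_ne_nil hne)]
      rw [h0, List.set_getElem_self]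
    · exact absurd hbad (hB i (by omega) (by assumption))
  · obtain ⟨t, m, rfl, rfl, _, htn, hbadt, hleast, hmaxat⟩ := hB
    rcases hij with ⟨hnone, rfl, rfl⟩ | ⟨_, hin, hbadi, hleasti, hmaxati⟩
    · exact absurd hbadt (hnone t (by omega) htn)
    · have hit : i = t := by
        rcases Nat.lt_trichotomy i t with h | h | h
        · exact absurd hbadi (hleast i (by omega) h)
        · exact h
        · exact absurd hbadt (hleasti t (by omega) h)
      subst hit
      have hjm : j = m := pvMaxAt_unique hmaxati hmaxat
      subst hjm
      simp

-- ===== VERDICT (by name: the statement is the Claim_ definition above) =====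
theorem max_swap_spec : Claim_equal_max_swap := by
  intro num _ hpre
  unfold Spec_max_swap max_swap max_swap_alt
  have h := core_eq (pvDigits num) (pvDigits_ne_nil num hpre) (pvDigits_le num hpre)
  rcases hA : maxSwapLoopA (pvDigits num) (pvDigits num).length ((pvDigits num).length - 1, 0, 0) with ⟨mI, i, j⟩
  rcases hB : maxSwapOuterB (maxSwapLastB (pvDigits num)) (PySem.List.enumerate (pvDigits num)) with _ | ⟨bi, bj⟩ <;>
    simp only [hA, hB] at h ⊢ <;> rw [h]
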